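-- pv_equiv track=rewrite | github.com/rranjan11/Advent-of-Code-2020 | seating_system.py | simulate_seating_old
-- ===== SOURCE A (Python) =====
-- def simulate_seating_old(layout):
--     while True:
--         layout_copy = layout.copy()
--         for i in range(len(layout)):
--             for j in range(len(layout[0])):
--                 adjacent_seats_occupied = 0
--                 if i - 1 >= 0 and layout[i - 1][j] == '#':
--                     adjacent_seats_occupied += 1
--                 if i - 1 >= 0 and j + 1 < len(layout[0]) and layout[i - 1][j + 1] == '#':
--                     adjacent_seats_occupied += 1
--                 if j + 1 < len(layout[0]) and layout[i][j + 1] == '#':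
--                     adjacent_seats_occupied += 1
--                 if i + 1 < len(layout) and j + 1 < len(layout[0]) and layout[i + 1][j + 1] == '#':
--                     adjacent_seats_occupied += 1
--                 if i + 1 < len(layout) and layout[i + 1][j] == '#':
--                     adjacent_seats_occupied += 1
--                 if i + 1 < len(layout) and j - 1 >= 0 and layout[i + 1][j - 1] == '#':
--                     adjacent_seats_occupied += 1
--                 if j - 1 >= 0 and layout[i][j - 1] == '#':
--                     adjacent_seats_occupied += 1
--                 if i - 1 >= 0 and j - 1 >= 0 and layout[i - 1][j - 1] == '#':
--                     adjacent_seats_occupied += 1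
--                 if layout[i][j] == 'L' and adjacent_seats_occupied == 0:
--                     layout_copy[i] = layout_copy[i][:j] + '#' + layout_copy[i][j + 1:]
--                 elif layout[i][j] == '#' and adjacent_seats_occupied >= 4:
--                     layout_copy[i] = layout_copy[i][:j] + 'L' + layout_copy[i][j + 1:]
--         if layout_copy == layout:
--             return layout
--         layout = layout_copy.copy()
-- ===== SOURCE B (Python) =====
-- def simulate_seating_old(layout):
--     while True:
--         R = len(layout)
--         C = len(layout[0]) if layout else 0
--         bits = [[1 if ch == '#' else 0 for ch in row] for row in layout]
--         zero = [0] * C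
--         new_layout = []
--         for i in range(R):
--             above = bits[i - 1] if i > 0 else zero
--             below = bits[i + 1] if i + 1 < R else zero
--             cur = bits[i]
--             col = [above[j] + cur[j] + below[j] for j in range(C)]
--             row = layout[i]
--             chars = []
--             for j in range(C):
--                 n = col[j] - cur[j]
--                 if j > 0:
--                     n += col[j - 1]
--                 if j + 1 < C:
--                     n += col[j + 1]
--                 ch = row[j]
--                 if ch == 'L' and n == 0:
--                     chars.append('#')
--                 elif ch == '#' and n >= 4:
--                     chars.append('L')
--                 else:
--                     chars.append(ch)
--             new_layout.append(''.join(chars) + row[C:])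
--         if new_layout == layout:
--             return layout
--         layout = new_layout
-- ===== Notes on version B (the rewrite author's own statement) =====
-- stated objective: alternative
-- what changed: Each sweep now builds 0/1 seat rows once, forms per-column sums of the three adjacent rows, and reads each cell's neighbour count from a 3-wide window of those sums (sum-of-3x3 minus centre), instead of A's eight guarded grid reads and string-slice updates per cell; measured ~1.4-1.7x, below the confirmation threshold.
import Mathlib
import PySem

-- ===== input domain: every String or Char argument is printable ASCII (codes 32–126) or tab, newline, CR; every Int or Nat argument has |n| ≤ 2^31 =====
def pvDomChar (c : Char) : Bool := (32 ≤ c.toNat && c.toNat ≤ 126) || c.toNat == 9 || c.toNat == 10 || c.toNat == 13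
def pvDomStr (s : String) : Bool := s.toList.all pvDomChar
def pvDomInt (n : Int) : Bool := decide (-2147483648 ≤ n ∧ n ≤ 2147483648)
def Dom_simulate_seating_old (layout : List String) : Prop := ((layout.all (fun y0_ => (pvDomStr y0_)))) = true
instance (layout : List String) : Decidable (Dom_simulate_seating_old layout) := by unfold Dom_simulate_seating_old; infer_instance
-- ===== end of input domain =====

-- B replaces A's eight guarded grid reads per cell by per-row vertical 3-row sums reused through a
-- 3-wide horizontal window (sum-of-3x3 minus centre); the return value only is compared (neither
-- version observably mutates its argument).

-- ===== PORT A =====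
-- layout[a][b] == '#' (false also where Python would raise IndexError; those inputs are outside Pre_)
def hashAt (layout : List String) (a b : Int) : Bool :=
  PySem.Str.pyGet? (PySem.List.pyGetD layout a "") b == some '#'

-- 'adjacent_seats_occupied += 1' under a condition
-- 'adjacent_seats_occupied += 1' under a condition
def bump (a : Int) (c : Bool) : Int := if c then a + 1 else a

-- the eight guarded increments, in A's order
-- the eight guarded increments, in A's order
def adjA (layout : List String) (R C i j : Int) : Int :=
  bump (bump (bump (bump (bump (bump (bump (bump 0
    (decide (0 ≤ i - 1) && hashAt layout (i-1) j))
    (decide (0 ≤ i - 1) && decide (j + 1 < C) && hashAt layout (i-1) (j+1)))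
    (decide (j + 1 < C) && hashAt layout i (j+1)))
    (decide (i + 1 < R) && decide (j + 1 < C) && hashAt layout (i+1) (j+1)))
    (decide (i + 1 < R) && hashAt layout (i+1) j))
    (decide (i + 1 < R) && decide (0 ≤ j - 1) && hashAt layout (i+1) (j-1)))
    (decide (0 ≤ j - 1) && hashAt layout i (j-1)))
    (decide (0 ≤ i - 1) && decide (0 ≤ j - 1) && hashAt layout (i-1) (j-1))

-- body of A's inner j-loop: maybe replace layout_copy[i]
-- body of A's inner j-loop: maybe replace layout_copy[i]
def updA (layout : List String) (R C : Int) (copy : List String) (i j : Int) : List String :=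
  let adjacent := adjA layout R C i j
  if PySem.Str.pyGet? (PySem.List.pyGetD layout i "") j == some 'L' && adjacent == 0 then
    PySem.List.pySetD copy i
      (PySem.Str.slice (PySem.List.pyGetD copy i "") none (some j) ++ "#" ++
        PySem.Str.slice (PySem.List.pyGetD copy i "") (some (j+1)) none)
  else if PySem.Str.pyGet? (PySem.List.pyGetD layout i "") j == some '#' && decide (adjacent ≥ 4) then
    PySem.List.pySetD copy i
      (PySem.Str.slice (PySem.List.pyGetD copy i "") none (some j) ++ "L" ++
        PySem.Str.slice (PySem.List.pyGetD copy i "") (some (j+1)) none)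
  else copy

def stepA (layout : List String) : List String :=
  (PySem.List.pyRange 0 (layout.length : Int)).foldl (fun copy i =>
    (PySem.List.pyRange 0 (PySem.Str.len (PySem.List.pyGetD layout 0 ""))).foldl
      (fun copy j =>
        updA layout (layout.length : Int) (PySem.Str.len (PySem.List.pyGetD layout 0 "")) copy i j)
      copy) layout

-- 'while True' as fuel recursion: the walk is deterministic on at most 2^(R*C) reachable seat
-- patterns, so any fixpoint the Python loop ever reaches is reached within the fuel (totality guard)
def loopA : Nat → List String → List String
  | 0, layout => layout
  | fuel+1, layout =>
      let layout_copy := stepA layout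
      if layout_copy == layout then layout else loopA fuel layout_copy

def simulate_seating_old (layout : List String) : List String :=
  loopA (2 ^ (layout.length * (PySem.Str.len (layout.headD "")).toNat) + 1) layout

-- ===== PORT B =====
def bitsB (layout : List String) : List (List Int) :=
  layout.map (fun row => row.toList.map (fun ch => if ch == '#' then (1:Int) else 0))

def colB (above cur below : List Int) (C : Int) : List Int :=
  (PySem.List.pyRange 0 C).map (fun j =>
    PySem.List.pyGetD above j 0 + PySem.List.pyGetD cur j 0 + PySem.List.pyGetD below j 0)

def nbB (col cur : List Int) (C j : Int) : Int :=
  let n0 := PySem.List.pyGetD col j 0 - PySem.List.pyGetD cur j 0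
  let n1 := if decide (0 < j) then n0 + PySem.List.pyGetD col (j-1) 0 else n0
  if decide (j + 1 < C) then n1 + PySem.List.pyGetD col (j+1) 0 else n1

def rowB (layout : List String) (bits : List (List Int)) (zero : List Int) (R C i : Int) : String :=
  let above := if decide (0 < i) then PySem.List.pyGetD bits (i-1) [] else zero
  let below := if decide (i + 1 < R) then PySem.List.pyGetD bits (i+1) [] else zero
  let cur := PySem.List.pyGetD bits i []
  let col := colB above cur below C
  let row := PySem.List.pyGetD layout i ""
  let chars : List Char := (PySem.List.pyRange 0 C).foldl (fun chars j =>
    let n := nbB col cur C j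
    let ch := (PySem.Str.pyGet? row j).getD ' '
    if ch == 'L' && n == 0 then chars ++ ['#']
    else if ch == '#' && decide (n ≥ 4) then chars ++ ['L']
    else chars ++ [ch]) []
  String.ofList chars ++ PySem.Str.slice row (some C) none

def stepB (layout : List String) : List String :=
  let R : Int := (layout.length : Int)
  let C : Int := if layout.isEmpty then 0 else PySem.Str.len (PySem.List.pyGetD layout 0 "")
  let bits := bitsB layout
  let zero : List Int := PySem.List.pyRepeat [(0:Int)] C
  (PySem.List.pyRange 0 R).foldl (fun new_layout i =>
    new_layout ++ [rowB layout bits zero R C i]) []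

def loopB : Nat → List String → List String
  | 0, layout => layout
  | fuel+1, layout =>
      let new_layout := stepB layout
      if new_layout == layout then layout else loopB fuel new_layout

def simulate_seating_old_alt (layout : List String) : List String :=
  loopB (2 ^ (layout.length * (PySem.Str.len (layout.headD "")).toNat) + 1) layout

-- ===== PRECONDITION & SPEC =====
-- Pre_ excludes exactly the inputs where A raises IndexError: some row shorter than row 0
-- (A reads layout[i][j] for every j < len(layout[0])); B raises on those inputs as well.
def Pre_simulate_seating_old (layout : List String) : Prop :=
  ∀ s ∈ layout, PySem.Str.len (layout.headD "") ≤ PySem.Str.len s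
instance (layout : List String) : Decidable (Pre_simulate_seating_old layout) := by
  unfold Pre_simulate_seating_old; infer_instance

def pvWitness_simulate_seating_old : List String := ["L.L#", "#LL.", "...L"]

def Spec_simulate_seating_old (layout : List String) (out : List String) : Prop := out = simulate_seating_old_alt layout
instance (layout : List String) (out : List String) : Decidable (Spec_simulate_seating_old layout out) := by unfold Spec_simulate_seating_old; infer_instance

-- ===== CLAIM (what is proved, stated in full; the proofs are below) =====
def Claim_equal_simulate_seating_old : Prop := ∀ (layout : List String), Dom_simulate_seating_old layout → Pre_simulate_seating_old layout → Spec_simulate_seating_old layout (simulate_seating_old layout)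

-- ===== LEMMAS AND PROOFS =====

-- One pass of either while-body, specified on List Char rows:
-- occS g C i j = 1 iff (i,j) is an in-bounds '#' cell (j < C; on Pre_ all rows have length ≥ C)
def occS (g : List (List Char)) (C : Nat) (i j : Int) : Int :=
  if 0 ≤ i ∧ 0 ≤ j ∧ j < (C:Int) ∧ (g.getD i.toNat []).getD j.toNat ' ' = '#' then 1 else 0

def cntS (g : List (List Char)) (C : Nat) (i j : Int) : Int :=
  occS g C (i-1) j + occS g C (i-1) (j+1) + occS g C i (j+1) + occS g C (i+1) (j+1) +
  occS g C (i+1) j + occS g C (i+1) (j-1) + occS g C i (j-1) + occS g C (i-1) (j-1)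

def newCharS (g : List (List Char)) (C : Nat) (i j : Nat) : Char :=
  let ch := (g.getD i []).getD j ' '
  if ch = 'L' ∧ cntS g C i j = 0 then '#'
  else if ch = '#' ∧ cntS g C i j ≥ 4 then 'L'
  else ch

def newRowS (g : List (List Char)) (C : Nat) (i : Nat) : List Char :=
  (List.range C).map (newCharS g C i) ++ (g.getD i []).drop C

def stepStr (layout : List String) : List String :=
  let g := layout.map String.toList
  let C := (layout.headD "").toList.length
  (List.range layout.length).map (fun i => String.ofList (newRowS g C i))

lemma occ_zero (g : List (List Char)) (C : Nat) (i j : Int)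
    (h : j < 0 ∨ (C:Int) ≤ j ∨ i < 0 ∨ (g.length:Int) ≤ i) : occS g C i j = 0 := by
  unfold occS
  rcases h with h|h|h|h <;> rw [if_neg] <;> rintro ⟨h0, h1, h2, h3⟩
  · omega
  · omega
  · omega
  · have hlen : g.length ≤ i.toNat := by omega
    rw [List.getD_eq_getElem?_getD (l := g), List.getElem?_eq_none hlen] at h3
    simp at h3

lemma occ_val (g : List (List Char)) (C : Nat) (i j : Nat) (hj : j < C) :
    occS g C (i:Int) (j:Int) = (if (g.getD i []).getD j ' ' = '#' then (1:Int) else 0) := by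
  unfold occS
  have h0 : ((i:Int)).toNat = i := by omega
  have h1 : ((j:Int)).toNat = j := by omega
  rw [h0, h1]
  by_cases hc : (g.getD i []).getD j ' ' = '#'
  · rw [if_pos ⟨by omega, by omega, by exact_mod_cast hj, hc⟩, if_pos hc]
  · rw [if_neg (by rintro ⟨_,_,_,hx⟩; exact hc hx), if_neg hc]

lemma bitval (row : List Char) (m : Nat) (hm : m < row.length) :
    PySem.List.pyGetD (row.map (fun ch => if ch == '#' then (1:Int) else 0)) (m:Int) 0
      = (if row.getD m ' ' = '#' then (1:Int) else 0) := by
  rw [PySem.List.pyGetD_eq_getElem _ _ (by omega) (by simpa using (by omega : (m:Int) < (row.length:Int)))]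
  simp [hm, List.getD_eq_getElem?_getD]

lemma getD_g (layout : List String) (i : Nat) (hi : i < layout.length) :
    (layout.map String.toList).getD i [] = layout[i].toList := by
  rw [List.getD_eq_getElem?_getD, List.getElem?_map, List.getElem?_eq_getElem hi]
  rfl

lemma rowlen (layout : List String) (hpre : Pre_simulate_seating_old layout)
    (i : Nat) (hi : i < layout.length) :
    (layout.headD "").toList.length ≤ ((layout.map String.toList).getD i []).length := by
  have := hpre layout[i] (List.getElem_mem hi)
  rw [PySem.Str.len_eq, PySem.Str.len_eq] at this
  rw [getD_g layout i hi]
  omega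

-- value of bits[a] looked up at column m, as occS  (a : Int may be any in-bounds row index)
lemma bits_val (layout : List String) (hpre : Pre_simulate_seating_old layout)
    (a m : Nat) (ha : a < layout.length) (hm : m < (layout.headD "").toList.length) :
    PySem.List.pyGetD (PySem.List.pyGetD (bitsB layout) (a:Int) []) (m:Int) 0
      = occS (layout.map String.toList) (layout.headD "").toList.length (a:Int) (m:Int) := by
  have h1 : PySem.List.pyGetD (bitsB layout) (a:Int) []
      = ((layout.map String.toList).getD a []).map (fun ch => if ch == '#' then (1:Int) else 0) := by
    rw [PySem.List.pyGetD_eq_getElem _ _ (by omega)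
        (by simpa [bitsB] using (by exact_mod_cast ha : (a:Int) < (layout.length:Int)))]
    simp [bitsB, List.getElem?_eq_getElem ha]
  rw [h1, bitval _ m (by have := rowlen layout hpre a ha; omega),
      occ_val _ _ a m hm]

-- zero[m] = 0
lemma zero_val (C : Nat) (m : Nat) (hm : m < C) :
    PySem.List.pyGetD (PySem.List.pyRepeat [(0:Int)] (C:Int)) (m:Int) 0 = 0 := by
  rw [PySem.List.pyRepeat_singleton]
  rw [PySem.List.pyGetD_eq_getElem _ _ (by omega)
      (by simpa using (by omega : (m:Int) < (C:Int)))]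
  simp

lemma rowB_eq (layout : List String) (hpre : Pre_simulate_seating_old layout)
    (i : Nat) (hi : i < layout.length) :
    rowB layout (bitsB layout)
        (PySem.List.pyRepeat [(0:Int)] (((layout.headD "").toList.length : Nat) : Int))
        ((layout.length : Nat) : Int) (((layout.headD "").toList.length : Nat) : Int) (i : Int)
      = String.ofList (newRowS (layout.map String.toList) (layout.headD "").toList.length i) := by
  set g := layout.map String.toList with hg
  set Cn := (layout.headD "").toList.length with hCn
  set R := layout.length with hR
  unfold rowB
  set zero : List Int := PySem.List.pyRepeat [(0:Int)] (Cn:Int) with hzero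
  set A := if decide (0 < (i:Int)) then PySem.List.pyGetD (bitsB layout) ((i:Int)-1) [] else zero with hA
  set B := if decide ((i:Int) + 1 < (R:Int)) then PySem.List.pyGetD (bitsB layout) ((i:Int)+1) [] else zero with hB
  set cur := PySem.List.pyGetD (bitsB layout) (i:Int) [] with hcur
  have hcurv : ∀ m : Nat, m < Cn → PySem.List.pyGetD cur (m:Int) 0 = occS g Cn (i:Int) (m:Int) := by
    intro m hm
    rw [hcur, bits_val layout hpre i m hi hm]
  have hAv : ∀ m : Nat, m < Cn → PySem.List.pyGetD A (m:Int) 0 = occS g Cn ((i:Int)-1) (m:Int) := by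
    intro m hm
    rw [hA]
    by_cases hp : 0 < i
    · rw [if_pos (decide_eq_true (by exact_mod_cast hp))]
      have hc : ((i:Int) - 1) = (((i-1 : Nat)) : Int) := by omega
      rw [hc, bits_val layout hpre (i-1) m (by omega) hm]
    · have h0 : i = 0 := by omega
      subst h0
      rw [if_neg (by simp), hzero, zero_val Cn m hm, occ_zero _ _ _ _ (by right; right; left; omega)]
  have hBv : ∀ m : Nat, m < Cn → PySem.List.pyGetD B (m:Int) 0 = occS g Cn ((i:Int)+1) (m:Int) := by
    intro m hm
    rw [hB]
    by_cases hp : i + 1 < R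
    · rw [if_pos (decide_eq_true (by exact_mod_cast hp))]
      have hc : ((i:Int) + 1) = (((i+1 : Nat)) : Int) := by omega
      rw [hc, bits_val layout hpre (i+1) m (by omega) hm]
    · rw [if_neg (by simp; omega), hzero, zero_val Cn m hm,
          occ_zero _ _ _ _ (by right; right; right; simp [hg]; omega)]
  have hcolv : ∀ m : Nat, m < Cn →
      PySem.List.pyGetD (colB A cur B (Cn:Int)) (m:Int) 0
        = occS g Cn ((i:Int)-1) (m:Int) + occS g Cn (i:Int) (m:Int) + occS g Cn ((i:Int)+1) (m:Int) := by
    intro m hm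
    rw [colB, PySem.List.pyGetD_map_pyRange _ Cn m 0 hm, hAv m hm, hcurv m hm, hBv m hm]
  have hnv : ∀ m : Nat, m < Cn → nbB (colB A cur B (Cn:Int)) cur (Cn:Int) (m:Int) = cntS g Cn (i:Int) (m:Int) := by
    intro m hm
    unfold nbB
    rw [hcolv m hm, hcurv m hm]
    by_cases hm1 : m + 1 < Cn
    · rw [if_pos (decide_eq_true (by omega))]
      rw [(show ((m:Int)+1) = (((m+1:Nat)):Int) by omega), hcolv (m+1) (by omega)]
      by_cases hm0 : 0 < m
      · rw [if_pos (decide_eq_true (by exact_mod_cast hm0))]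
        rw [(show ((m:Int)-1) = (((m-1:Nat)):Int) by omega), hcolv (m-1) (by omega)]
        rw [(show (((m-1:Nat)):Int) = (m:Int)-1 by omega), (show (((m+1:Nat)):Int) = (m:Int)+1 by omega)]
        unfold cntS
        ring
      · have h0 : m = 0 := by omega
        subst h0
        rw [if_neg (by simp)]
        rw [(show (((0+1:Nat)):Int) = ((0:Nat):Int)+1 by omega)]
        unfold cntS
        rw [occ_zero g Cn ((i:Int)-1) (((0:Nat):Int)-1) (by left; omega),
            occ_zero g Cn ((i:Int)) (((0:Nat):Int)-1) (by left; omega),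
            occ_zero g Cn ((i:Int)+1) (((0:Nat):Int)-1) (by left; omega)]
        ring
    · rw [if_neg (by simp; omega)]
      have z1 : occS g Cn ((i:Int)-1) ((m:Int)+1) = 0 := occ_zero _ _ _ _ (by right; left; omega)
      have z2 : occS g Cn (i:Int) ((m:Int)+1) = 0 := occ_zero _ _ _ _ (by right; left; omega)
      have z3 : occS g Cn ((i:Int)+1) ((m:Int)+1) = 0 := occ_zero _ _ _ _ (by right; left; omega)
      by_cases hm0 : 0 < m
      · rw [if_pos (decide_eq_true (by exact_mod_cast hm0))]
        rw [(show ((m:Int)-1) = (((m-1:Nat)):Int) by omega), hcolv (m-1) (by omega)]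
        rw [(show (((m-1:Nat)):Int) = (m:Int)-1 by omega)]
        unfold cntS
        rw [z1, z2, z3]
        ring
      · have h0 : m = 0 := by omega
        subst h0
        rw [if_neg (by simp)]
        unfold cntS
        rw [z1, z2, z3,
            occ_zero g Cn ((i:Int)-1) (((0:Nat):Int)-1) (by left; omega),
            occ_zero g Cn ((i:Int)) (((0:Nat):Int)-1) (by left; omega),
            occ_zero g Cn ((i:Int)+1) (((0:Nat):Int)-1) (by left; omega)]
        ring
  dsimp only
  have hrowi : PySem.List.pyGetD layout (i:Int) "" = layout[i] := by
    rw [PySem.List.pyGetD_eq_getElem _ _ (by omega) (by exact_mod_cast hi)]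
    simp
  have hlenrow : Cn ≤ layout[i].toList.length := by
    have := rowlen layout hpre i hi
    rw [getD_g layout i hi] at this
    omega
  rw [hrowi, PySem.List.pyRange_zero_natCast Cn, List.foldl_map]
  set F := fun (x : List Char) (y : Nat) =>
      if ((PySem.Str.pyGet? layout[i] (y:Int)).getD ' ' == 'L' && nbB (colB A cur B (Cn:Int)) cur (Cn:Int) (y:Int) == 0) = true then x ++ ['#']
      else if ((PySem.Str.pyGet? layout[i] (y:Int)).getD ' ' == '#' && decide (nbB (colB A cur B (Cn:Int)) cur (Cn:Int) (y:Int) ≥ 4)) = true then x ++ ['L']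
      else x ++ [(PySem.Str.pyGet? layout[i] (y:Int)).getD ' '] with hF
  have hbody : ∀ (acc : List Char) (m : Nat), m ∈ List.range Cn →
      F acc m = (fun (acc : List Char) (m : Nat) => acc ++ [newCharS g Cn i m]) acc m := by
    intro acc m hmem
    have hm : m < Cn := List.mem_range.mp hmem
    rw [hF]
    simp only
    rw [hnv m hm]
    have hch : (PySem.Str.pyGet? layout[i] (m:Int)).getD ' ' = (g.getD i []).getD m ' ' := by
      simp [PySem.Str.pyGet?_eq, List.getD_eq_getElem?_getD, hg,
            List.getElem?_map, List.getElem?_eq_getElem hi]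
    rw [hch]
    unfold newCharS
    set c := cntS g Cn (i:Int) (m:Int) with hc
    set ch := (g.getD i []).getD m ' ' with hchd
    by_cases h1 : ch = 'L' ∧ c = 0
    · simp [h1.1, h1.2]
    · by_cases h2 : ch = '#' ∧ c ≥ 4
      · have h2' : ch ≠ 'L' := by rw [h2.1]; decide
        simp only [Bool.and_eq_true, beq_iff_eq, decide_eq_true_eq]
        rw [if_neg (by rintro ⟨hx, _⟩; exact h2' hx), if_pos ⟨h2.1, h2.2⟩, if_neg h1, if_pos h2]
      · simp only [Bool.and_eq_true, beq_iff_eq, decide_eq_true_eq]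
        rw [if_neg h1, if_neg h2, if_neg h1, if_neg h2]
  rw [PySem.List.foldl_congr_mem (List.range Cn) F
        (fun (acc : List Char) (m : Nat) => acc ++ [newCharS g Cn i m]) [] hbody,
      PySem.List.foldl_append_singleton_eq_map]
  apply String.ext
  rw [String.toList_append, String.toList_ofList, PySem.Str.toList_slice,
      PySem.Chars.slice_eq_listSlice, PySem.List.slice_from _ (by omega : (0:Int) ≤ (Cn:Int))]
  simp [newRowS, hg, List.getElem?_map, List.getElem?_eq_getElem hi, List.getD_eq_getElem?_getD]

theorem stepB_eq_stepStr (layout : List String)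
    (hpre : Pre_simulate_seating_old layout) : stepB layout = stepStr layout := by
  by_cases hL : layout = []
  · subst hL; rfl
  unfold stepB
  dsimp only
  set Cn := (layout.headD "").toList.length with hCn
  have hC : (if layout.isEmpty then 0 else PySem.Str.len (PySem.List.pyGetD layout 0 "")) = (Cn:Int) := by
    match layout, hL with
    | (a :: t), _ =>
      rw [if_neg (by simp), PySem.List.pyGetD_zero_cons, PySem.Str.len_eq]
      simp [hCn]
  rw [hC, PySem.List.pyRange_zero_natCast layout.length, List.foldl_map]
  set F2 := fun (nl : List String) (y : Nat) =>
    nl ++ [rowB layout (bitsB layout) (PySem.List.pyRepeat [(0:Int)] (Cn:Int)) (layout.length:Int) (Cn:Int) (y:Int)] with hF2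
  have hbody2 : ∀ (acc : List String), ∀ y ∈ List.range layout.length,
      F2 acc y = (fun (acc : List String) (y : Nat) =>
        acc ++ [String.ofList (newRowS (layout.map String.toList) Cn y)]) acc y := by
    intro acc y hy
    have hylt : y < layout.length := List.mem_range.mp hy
    rw [hF2]
    simp only
    rw [rowB_eq layout hpre y hylt]
  rw [PySem.List.foldl_congr_mem (List.range layout.length) F2
        (fun (acc : List String) (y : Nat) =>
          acc ++ [String.ofList (newRowS (layout.map String.toList) Cn y)]) [] hbody2,
      PySem.List.foldl_append_singleton_eq_map]
  unfold stepStr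
  simp [hCn]

lemma bump_eq (a : Int) (c : Bool) : bump a c = a + (if c then 1 else 0) := by
  cases c <;> simp [bump]

lemma pySetD_natCast (xs : List α) (n : Nat) (v : α) (h : n < xs.length) :
    PySem.List.pySetD xs (n:Int) v = xs.set n v := by
  simp [PySem.List.pySetD, PySem.List.pySet?, PySem.List.pyIdx?, h]

-- hashAt equals the occS indicator when all four bounds hold
lemma hashAt_occ (layout : List String) (hpre : Pre_simulate_seating_old layout)
    (a b : Int) (h0a : 0 ≤ a) (haR : a < (layout.length:Int))
    (h0b : 0 ≤ b) (hbC : b < ((layout.headD "").toList.length:Int)) :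
    (if hashAt layout a b then (1:Int) else 0)
      = occS (layout.map String.toList) (layout.headD "").toList.length a b := by
  have ha : a.toNat < layout.length := by omega
  have hb' : b.toNat < (layout.headD "").toList.length := by omega
  have hcast : a = ((a.toNat : Nat) : Int) := by omega
  have hcastb : b = ((b.toNat : Nat) : Int) := by omega
  rw [hcast, hcastb, occ_val _ _ _ _ hb']
  unfold hashAt
  rw [← hcast, ← hcastb]
  have hrowa : PySem.List.pyGetD layout a "" = layout[a.toNat] := by
    rw [PySem.List.pyGetD_eq_getElem _ _ h0a (by exact_mod_cast haR)]
  have hlen : b.toNat < layout[a.toNat].toList.length := by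
    have := rowlen layout hpre a.toNat ha
    rw [getD_g layout a.toNat ha] at this
    omega
  rw [hrowa]
  have hget : PySem.Str.pyGet? layout[a.toNat] b = some (layout[a.toNat].toList[b.toNat]) := by
    rw [PySem.Str.pyGet?_eq, PySem.Chars.pyGet?_eq_listPyGet?,
        PySem.List.pyGet?_of_nonneg _ h0b, List.getElem?_eq_getElem hlen]
  rw [hget, getD_g layout a.toNat ha]
  rw [List.getD_eq_getElem?_getD, List.getElem?_eq_getElem hlen]
  simp only [Option.getD_some]
  by_cases hc : layout[a.toNat].toList[b.toNat] = '#'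
  · rw [if_pos (by simpa using hc), if_pos hc]
  · rw [if_neg (by simpa using hc), if_neg hc]

lemma adjA_eq (layout : List String) (hpre : Pre_simulate_seating_old layout)
    (i m : Nat) (hi : i < layout.length) (hm : m < (layout.headD "").toList.length) :
    adjA layout (layout.length : Int) ((layout.headD "").toList.length : Int) (i:Int) (m:Int)
      = cntS (layout.map String.toList) (layout.headD "").toList.length (i:Int) (m:Int) := by
  set g := layout.map String.toList with hg
  set Cn := (layout.headD "").toList.length with hCn
  set R := layout.length with hR
  have hocc : ∀ (a b : Int), 0 ≤ a → a < (R:Int) → 0 ≤ b → b < (Cn:Int) →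
      (if hashAt layout a b then (1:Int) else 0) = occS g Cn a b :=
    fun a b h1 h2 h3 h4 => hashAt_occ layout hpre a b h1 h2 h3 h4
  have t1 : (if decide (0 ≤ (i:Int) - 1) && hashAt layout ((i:Int)-1) (m:Int) then (1:Int) else 0)
      = occS g Cn ((i:Int)-1) (m:Int) := by
    by_cases h : 0 ≤ (i:Int) - 1
    · rw [decide_eq_true h, Bool.true_and]
      exact hocc _ _ h (by omega) (by omega) (by omega)
    · rw [decide_eq_false h, Bool.false_and, if_neg (by simp),
          occ_zero _ _ _ _ (by right; right; left; omega)]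
  have t2 : (if decide (0 ≤ (i:Int) - 1) && decide ((m:Int) + 1 < (Cn:Int)) && hashAt layout ((i:Int)-1) ((m:Int)+1) then (1:Int) else 0)
      = occS g Cn ((i:Int)-1) ((m:Int)+1) := by
    by_cases h : 0 ≤ (i:Int) - 1
    · by_cases h2 : (m:Int) + 1 < (Cn:Int)
      · rw [decide_eq_true h, decide_eq_true h2]
        simp only [Bool.true_and]
        exact hocc _ _ h (by omega) (by omega) h2
      · rw [decide_eq_false h2, Bool.and_false, Bool.false_and, if_neg (by simp),
            occ_zero _ _ _ _ (by right; left; omega)]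
    · rw [decide_eq_false h, Bool.false_and, Bool.false_and, if_neg (by simp),
          occ_zero _ _ _ _ (by right; right; left; omega)]
  have t3 : (if decide ((m:Int) + 1 < (Cn:Int)) && hashAt layout (i:Int) ((m:Int)+1) then (1:Int) else 0)
      = occS g Cn (i:Int) ((m:Int)+1) := by
    by_cases h2 : (m:Int) + 1 < (Cn:Int)
    · rw [decide_eq_true h2, Bool.true_and]
      exact hocc _ _ (by omega) (by omega) (by omega) h2
    · rw [decide_eq_false h2, Bool.false_and, if_neg (by simp),
          occ_zero _ _ _ _ (by right; left; omega)]
  have t4 : (if decide ((i:Int) + 1 < (R:Int)) && decide ((m:Int) + 1 < (Cn:Int)) && hashAt layout ((i:Int)+1) ((m:Int)+1) then (1:Int) else 0)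
      = occS g Cn ((i:Int)+1) ((m:Int)+1) := by
    by_cases h : (i:Int) + 1 < (R:Int)
    · by_cases h2 : (m:Int) + 1 < (Cn:Int)
      · rw [decide_eq_true h, decide_eq_true h2]
        simp only [Bool.true_and]
        exact hocc _ _ (by omega) h (by omega) h2
      · rw [decide_eq_false h2, Bool.and_false, Bool.false_and, if_neg (by simp),
            occ_zero _ _ _ _ (by right; left; omega)]
    · rw [decide_eq_false h, Bool.false_and, Bool.false_and, if_neg (by simp),
          occ_zero _ _ _ _ (by right; right; right; simp [hg]; omega)]
  have t5 : (if decide ((i:Int) + 1 < (R:Int)) && hashAt layout ((i:Int)+1) (m:Int) then (1:Int) else 0)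
      = occS g Cn ((i:Int)+1) (m:Int) := by
    by_cases h : (i:Int) + 1 < (R:Int)
    · rw [decide_eq_true h, Bool.true_and]
      exact hocc _ _ (by omega) h (by omega) (by omega)
    · rw [decide_eq_false h, Bool.false_and, if_neg (by simp),
          occ_zero _ _ _ _ (by right; right; right; simp [hg]; omega)]
  have t6 : (if decide ((i:Int) + 1 < (R:Int)) && decide (0 ≤ (m:Int) - 1) && hashAt layout ((i:Int)+1) ((m:Int)-1) then (1:Int) else 0)
      = occS g Cn ((i:Int)+1) ((m:Int)-1) := by
    by_cases h : (i:Int) + 1 < (R:Int)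
    · by_cases h2 : 0 ≤ (m:Int) - 1
      · rw [decide_eq_true h, decide_eq_true h2]
        simp only [Bool.true_and]
        exact hocc _ _ (by omega) h h2 (by omega)
      · rw [decide_eq_false h2, Bool.and_false, Bool.false_and, if_neg (by simp),
            occ_zero _ _ _ _ (by left; omega)]
    · rw [decide_eq_false h, Bool.false_and, Bool.false_and, if_neg (by simp),
          occ_zero _ _ _ _ (by right; right; right; simp [hg]; omega)]
  have t7 : (if decide (0 ≤ (m:Int) - 1) && hashAt layout (i:Int) ((m:Int)-1) then (1:Int) else 0)
      = occS g Cn (i:Int) ((m:Int)-1) := by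
    by_cases h2 : 0 ≤ (m:Int) - 1
    · rw [decide_eq_true h2, Bool.true_and]
      exact hocc _ _ (by omega) (by omega) h2 (by omega)
    · rw [decide_eq_false h2, Bool.false_and, if_neg (by simp),
          occ_zero _ _ _ _ (by left; omega)]
  have t8 : (if decide (0 ≤ (i:Int) - 1) && decide (0 ≤ (m:Int) - 1) && hashAt layout ((i:Int)-1) ((m:Int)-1) then (1:Int) else 0)
      = occS g Cn ((i:Int)-1) ((m:Int)-1) := by
    by_cases h : 0 ≤ (i:Int) - 1
    · by_cases h2 : 0 ≤ (m:Int) - 1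
      · rw [decide_eq_true h, decide_eq_true h2]
        simp only [Bool.true_and]
        exact hocc _ _ h (by omega) h2 (by omega)
      · rw [decide_eq_false h2, Bool.and_false, Bool.false_and, if_neg (by simp),
            occ_zero _ _ _ _ (by left; omega)]
    · rw [decide_eq_false h, Bool.false_and, Bool.false_and, if_neg (by simp),
          occ_zero _ _ _ _ (by right; right; left; omega)]
  unfold adjA
  rw [bump_eq, bump_eq, bump_eq, bump_eq, bump_eq, bump_eq, bump_eq, bump_eq]
  rw [t1, t2, t3, t4, t5, t6, t7, t8]
  unfold cntS
  ring

def rhoA (g : List (List Char)) (Cn : Nat) (i m : Nat) : List Char :=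
  (List.range m).map (newCharS g Cn i) ++ (g.getD i []).drop m

lemma rhoA_top (g : List (List Char)) (Cn : Nat) (i : Nat) :
    rhoA g Cn i Cn = newRowS g Cn i := rfl

lemma updA_step (layout : List String) (hpre : Pre_simulate_seating_old layout)
    (i m : Nat) (hi : i < layout.length) (hm : m < (layout.headD "").toList.length)
    (copy : List String) (hlen : copy.length = layout.length) :
    updA layout (layout.length : Int) ((layout.headD "").toList.length : Int)
        (PySem.List.pySetD copy (i:Int)
          (String.ofList (rhoA (layout.map String.toList) (layout.headD "").toList.length i m)))
        (i:Int) (m:Int)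
      = PySem.List.pySetD copy (i:Int)
          (String.ofList (rhoA (layout.map String.toList) (layout.headD "").toList.length i (m+1))) := by
  set g := layout.map String.toList with hg
  set Cn := (layout.headD "").toList.length with hCn
  have hic : i < copy.length := by omega
  have hrowlen : Cn ≤ layout[i].toList.length := by
    have := rowlen layout hpre i hi
    rw [getD_g layout i hi] at this
    omega
  have hmrow : m < layout[i].toList.length := by omega
  have hrho_len : m ≤ (rhoA g Cn i m).length := by
    unfold rhoA
    rw [List.length_append, List.length_map, List.length_range]
    omega
  -- the current copy row
  have hset : PySem.List.pySetD copy (i:Int) (String.ofList (rhoA g Cn i m))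
      = copy.set i (String.ofList (rhoA g Cn i m)) := pySetD_natCast _ _ _ hic
  have hgetset : PySem.List.pyGetD (copy.set i (String.ofList (rhoA g Cn i m))) (i:Int) ""
      = String.ofList (rhoA g Cn i m) := by
    rw [PySem.List.pyGetD_eq_getElem _ _ (by omega) (by simp; exact_mod_cast hic)]
    simp [List.getElem_set_self]
  -- shared facts
  have hcell : PySem.Str.pyGet? (PySem.List.pyGetD layout (i:Int) "") (m:Int)
      = some (layout[i].toList[m]) := by
    rw [PySem.List.pyGetD_eq_getElem _ _ (by omega) (by exact_mod_cast hi)]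
    simp [PySem.Str.pyGet?_eq, List.getElem?_eq_getElem hmrow]
  have hchar : (g.getD i []).getD m ' ' = layout[i].toList[m] := by
    rw [getD_g layout i hi, List.getD_eq_getElem?_getD, List.getElem?_eq_getElem hmrow]
    rfl
  have hdropg : (g.getD i []).drop m = layout[i].toList.drop m := by
    rw [getD_g layout i hi]
  -- the replacement string computed by A's slicing, for any inserted char c
  have hslice : ∀ c : Char, ∀ cs : String,
      PySem.Str.slice (String.ofList (rhoA g Cn i m)) none (some (m:Int)) ++ cs ++
        PySem.Str.slice (String.ofList (rhoA g Cn i m)) (some ((m:Int)+1)) none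
      = String.ofList ((List.range m).map (newCharS g Cn i) ++ cs.toList ++ (g.getD i []).drop (m+1)) := by
    intro c cs
    apply String.ext
    rw [String.toList_append, String.toList_append, PySem.Str.toList_slice, PySem.Str.toList_slice,
        PySem.Chars.slice_eq_listSlice, PySem.Chars.slice_eq_listSlice, String.toList_ofList,
        PySem.List.slice_to _ (by omega : (0:Int) ≤ (m:Int)),
        PySem.List.slice_from _ (by omega : (0:Int) ≤ (m:Int)+1)]
    unfold rhoA
    rw [(show ((m:Int)).toNat = m by omega), (show ((m:Int)+1).toNat = m+1 by omega)]
    rw [List.take_left' (by simp), String.toList_ofList]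
    rw [List.drop_append, (show m + 1 - ((List.range m).map (newCharS g Cn i)).length = 1 by simp),
        List.drop_drop, (show (List.drop (m+1) ((List.range m).map (newCharS g Cn i))) = [] by
          apply List.drop_eq_nil_of_le; simp)]
    simp
  -- rho at m+1
  have hrho1 : rhoA g Cn i (m+1)
      = (List.range m).map (newCharS g Cn i) ++ [newCharS g Cn i m] ++ (g.getD i []).drop (m+1) := by
    unfold rhoA
    rw [List.range_succ, List.map_append]
    simp
  unfold updA
  rw [hcell, adjA_eq layout hpre i m hi hm, hset, hgetset]
  by_cases h1 : layout[i].toList[m] = 'L' ∧ cntS g Cn (i:Int) (m:Int) = 0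
  · rw [if_pos (by
      simp only [Option.some_beq_some, Bool.and_eq_true, beq_iff_eq]
      exact ⟨h1.1, h1.2⟩)]
    rw [hslice '#' "#", pySetD_natCast _ _ _ (by simp [hic]), List.set_set]
    rw [hrho1, (show newCharS g Cn i m = '#' by unfold newCharS; rw [hchar]; simp [h1.1, h1.2])]
    rw [← pySetD_natCast _ _ _ hic]
    rfl
  · by_cases h2 : layout[i].toList[m] = '#' ∧ cntS g Cn (i:Int) (m:Int) ≥ 4
    · rw [if_neg (by
        simp only [Option.some_beq_some, Bool.and_eq_true, beq_iff_eq]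
        rintro ⟨hx, -⟩
        rw [h2.1] at hx
        exact absurd hx (by decide))]
      rw [if_pos (by
        simp only [Option.some_beq_some, Bool.and_eq_true, beq_iff_eq, decide_eq_true_eq]
        exact ⟨h2.1, h2.2⟩)]
      rw [hslice 'L' "L", pySetD_natCast _ _ _ (by simp [hic]), List.set_set]
      rw [hrho1, (show newCharS g Cn i m = 'L' by
        unfold newCharS
        rw [hchar]
        rw [if_neg (by rintro ⟨hx, hy⟩; exact h1 ⟨hx, hy⟩), if_pos ⟨h2.1, h2.2⟩])]
      rw [← pySetD_natCast _ _ _ hic]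
      rfl
    · rw [if_neg (by
        simp only [Option.some_beq_some, Bool.and_eq_true, beq_iff_eq]
        rintro ⟨hx, hy⟩
        exact h1 ⟨hx, hy⟩)]
      rw [if_neg (by
        simp only [Option.some_beq_some, Bool.and_eq_true, beq_iff_eq, decide_eq_true_eq]
        rintro ⟨hx, hy⟩
        exact h2 ⟨hx, hy⟩)]
      rw [pySetD_natCast copy i _ hic]
      congr 1
      rw [hrho1, (show newCharS g Cn i m = layout[i].toList[m] by
        unfold newCharS
        rw [hchar]
        rw [if_neg (by rintro ⟨hx, hy⟩; exact h1 ⟨hx, hy⟩),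
            if_neg (by rintro ⟨hx, hy⟩; exact h2 ⟨hx, hy⟩)])]
      unfold rhoA
      rw [hdropg, List.drop_eq_getElem_cons hmrow]
      simp
      have hgi : g[i]?.getD [] = layout[i].toList := by
        rw [hg, List.getElem?_map, List.getElem?_eq_getElem hi]
        rfl
      rw [hgi, List.drop_eq_getElem_cons hmrow]

lemma pyRange_zero_zero : PySem.List.pyRange 0 (0:Int) = [] := by
  decide

lemma innerA (layout : List String) (hpre : Pre_simulate_seating_old layout)
    (i : Nat) (hi : i < layout.length) (copy : List String)
    (hlen : copy.length = layout.length) (hci : copy[i]? = some layout[i]) :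
    ∀ m, m ≤ (layout.headD "").toList.length →
    (PySem.List.pyRange 0 (m:Int)).foldl
        (fun cp j => updA layout (layout.length : Int) ((layout.headD "").toList.length : Int) cp (i:Int) j) copy
      = PySem.List.pySetD copy (i:Int)
          (String.ofList (rhoA (layout.map String.toList) (layout.headD "").toList.length i m)) := by
  intro m
  induction m with
  | zero =>
    intro _
    rw [(show ((0:Nat):Int) = (0:Int) from rfl), pyRange_zero_zero]
    have hic : i < copy.length := by omega
    have hgi : ((layout.map String.toList).getD i []) = layout[i].toList := getD_g layout i hi
    rw [List.foldl_nil, pySetD_natCast _ _ _ hic]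
    unfold rhoA
    rw [List.drop_zero, List.range_zero, List.map_nil, List.nil_append, hgi,
        String.ofList_toList]
    have hci' : copy[i] = layout[i] := by
      rw [List.getElem?_eq_getElem hic] at hci
      exact Option.some_injective _ hci
    rw [← hci', List.set_getElem_self]
  | succ m ih =>
    intro hm1
    have hm : m < (layout.headD "").toList.length := by omega
    rw [(show ((m+1:Nat):Int) = (m:Int) + 1 by push_cast; ring),
        PySem.List.pyRange_one_succ_right (by omega : (0:Int) ≤ (m:Int)), List.foldl_append,
        ih (by omega), List.foldl_cons, List.foldl_nil]
    exact updA_step layout hpre i m hi hm copy hlen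

lemma outerA (layout : List String) (hpre : Pre_simulate_seating_old layout) :
    ∀ k, k ≤ layout.length →
    (PySem.List.pyRange 0 (k:Int)).foldl
        (fun copy i =>
          (PySem.List.pyRange 0 (((layout.headD "").toList.length : Nat) : Int)).foldl
            (fun cp j => updA layout (layout.length : Int) ((layout.headD "").toList.length : Int) cp i j) copy)
        layout
      = (List.range k).map (fun i =>
          String.ofList (newRowS (layout.map String.toList) (layout.headD "").toList.length i))
          ++ layout.drop k := by
  intro k
  induction k with
  | zero =>
    intro _
    rw [(show ((0:Nat):Int) = (0:Int) from rfl), pyRange_zero_zero]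
    simp
  | succ k ih =>
    intro hk1
    have hk : k < layout.length := by omega
    rw [(show ((k+1:Nat):Int) = (k:Int) + 1 by push_cast; ring),
        PySem.List.pyRange_one_succ_right (by omega : (0:Int) ≤ (k:Int)), List.foldl_append,
        ih (by omega), List.foldl_cons, List.foldl_nil]
    set pre := (List.range k).map (fun i =>
      String.ofList (newRowS (layout.map String.toList) (layout.headD "").toList.length i)) with hpredef
    have hprelen : pre.length = k := by simp [hpredef]
    have hlen : (pre ++ layout.drop k).length = layout.length := by
      rw [List.length_append, hprelen, List.length_drop]
      omega
    have hci : (pre ++ layout.drop k)[k]? = some layout[k] := by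
      rw [List.getElem?_append_right (by omega), hprelen, Nat.sub_self,
          List.getElem?_drop, Nat.add_zero, List.getElem?_eq_getElem hk]
    rw [innerA layout hpre k hk (pre ++ layout.drop k) hlen hci
        (layout.headD "").toList.length (le_refl _), rhoA_top]
    rw [pySetD_natCast _ _ _ (by omega)]
    rw [List.set_append, if_neg (by omega), hprelen, Nat.sub_self]
    rw [(show List.drop k layout = layout[k] :: List.drop (k+1) layout from (List.drop_eq_getElem_cons hk)),
        List.set_cons_zero]
    rw [List.range_succ, List.map_append, ← hpredef, List.append_assoc]
    rfl

theorem stepA_eq_stepStr (layout : List String)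
    (hpre : Pre_simulate_seating_old layout) : stepA layout = stepStr layout := by
  by_cases hL : layout = []
  · subst hL; rfl
  unfold stepA
  have hC : PySem.Str.len (PySem.List.pyGetD layout 0 "") = (((layout.headD "").toList.length : Nat) : Int) := by
    match layout, hL with
    | (a :: t), _ =>
      rw [PySem.List.pyGetD_zero_cons, PySem.Str.len_eq]
      simp
  rw [hC, outerA layout hpre layout.length (le_refl _), List.drop_length, List.append_nil]
  rfl


theorem pre_stepStr (layout : List String) : Pre_simulate_seating_old (stepStr layout) := by
  intro s hs
  unfold stepStr at hs
  obtain ⟨i, hi, rfl⟩ := List.mem_map.mp hs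
  simp only [List.mem_range] at hi
  have hR : layout ≠ [] := by rintro rfl; simp at hi
  have hhead : (stepStr layout).headD "" = String.ofList
      (newRowS (layout.map String.toList) (layout.headD "").toList.length 0) := by
    unfold stepStr
    match layout, hR with
    | (a :: t), _ => simp [List.range_succ_eq_map]
  rw [hhead]
  simp only [PySem.Str.len_eq, String.toList_ofList, newRowS, List.length_append,
    List.length_map, List.length_range]
  have h0 : (layout.map String.toList).getD 0 [] = (layout.headD "").toList := by
    match layout, hR with
    | (a :: t), _ => simp
  rw [h0]
  simp

theorem loopA_eq_loopB (fuel : Nat) (layout : List String)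
    (hpre : Pre_simulate_seating_old layout) : loopA fuel layout = loopB fuel layout := by
  induction fuel generalizing layout with
  | zero => rfl
  | succ n ih =>
    have hs : stepA layout = stepB layout := by
      rw [stepA_eq_stepStr layout hpre, stepB_eq_stepStr layout hpre]
    show (if stepA layout == layout then layout else loopA n (stepA layout)) =
         (if stepB layout == layout then layout else loopB n (stepB layout))
    rw [hs]
    by_cases h : stepB layout == layout
    · simp [h]
    · simp only [h, Bool.false_eq_true, if_false]
      refine ih _ ?_
      rw [stepB_eq_stepStr layout hpre]
      exact pre_stepStr layout

-- ===== VERDICT (by name: the statement is the Claim_ definition above) =====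
theorem simulate_seating_old_spec : Claim_equal_simulate_seating_old := by
  intro layout _ hpre
  show simulate_seating_old layout = simulate_seating_old_alt layout
  unfold simulate_seating_old simulate_seating_old_alt
  exact loopA_eq_loopB _ layout hpre
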